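-- pv_equiv track=rewrite | github.com/helloqxwang/crossembodimentaction | contact_gen/generate_random_contact_masks.py | _compute_sample_count_map
-- ===== SOURCE A (Python) =====
-- def _compute_sample_count_map(robot_names: list[str], sample_count: int, mode: str) -> dict[str, int]:
--     n = len(robot_names)
--     if n <= 0:
--         return {}
--     if mode == "total":
--         base = int(sample_count) // n
--         rem = int(sample_count) % n
--         return {name: int(base + (1 if i < rem else 0)) for i, name in enumerate(robot_names)}
--     if mode == "per_robot":
--         return {name: int(sample_count) for name in robot_names}
--     raise ValueError(f"Invalid sample_count_mode: {mode}. Expected 'per_robot' or 'total'.")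
-- ===== SOURCE B (Python) =====
-- def _compute_sample_count_map(robot_names: list[str], sample_count: int, mode: str) -> dict[str, int]:
--     n = len(robot_names)
--     if n <= 0:
--         return {}
--     if mode == "total":
--         result = {}
--         remaining = int(sample_count)
--         left = n
--         for name in robot_names:
--             give = -(-remaining // left)  # ceiling division of the remainder over the names left
--             result[name] = give
--             remaining -= give
--             left -= 1
--         return result
--     if mode == "per_robot":
--         return {name: int(sample_count) for name in robot_names}
--     raise ValueError(f"Invalid sample_count_mode: {mode}. Expected 'per_robot' or 'total'.")
-- ===== Notes on version B (the rewrite author's own statement) =====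
-- stated objective: alternative
-- what changed: The 'total' branch no longer precomputes base = count//n and rem = count%n with an index-based comprehension; instead it is a single greedy pass keeping two running integers (remaining, left) and giving each name the ceiling of remaining/left, which yields the same allocation.
-- outside the precondition, e.g. on _compute_sample_count_map(['a'], 3, 'bogus'): A raises ValueError, B raises ValueError
import Mathlib
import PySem

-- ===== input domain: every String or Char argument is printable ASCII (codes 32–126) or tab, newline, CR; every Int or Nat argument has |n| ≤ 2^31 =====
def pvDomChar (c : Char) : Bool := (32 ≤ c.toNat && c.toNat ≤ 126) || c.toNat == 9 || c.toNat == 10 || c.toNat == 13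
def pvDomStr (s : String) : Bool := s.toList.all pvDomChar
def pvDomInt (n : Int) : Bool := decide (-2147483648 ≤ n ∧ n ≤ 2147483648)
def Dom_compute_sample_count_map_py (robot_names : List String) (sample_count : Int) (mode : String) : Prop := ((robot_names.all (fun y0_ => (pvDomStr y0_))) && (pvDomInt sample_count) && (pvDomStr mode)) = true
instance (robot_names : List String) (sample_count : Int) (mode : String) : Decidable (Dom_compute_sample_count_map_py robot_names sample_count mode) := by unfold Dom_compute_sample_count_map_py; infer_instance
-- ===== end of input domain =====

-- B rewrites the 'total' branch as one greedy pass over the names keeping (remaining, left)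
-- and giving each name ceil(remaining/left), instead of the base+remainder closed form (objective: alternative).


-- ===== PORT A =====
def compute_sample_count_map_py (robot_names : List String) (sample_count : Int) (mode : String) : List (String × Int) :=
  let n : Int := robot_names.length
  if n ≤ 0 then []
  else if mode == "total" then
    let base := PySem.Int.floordiv sample_count n
    let rem := PySem.Int.mod sample_count n
    ((PySem.List.enumerate robot_names 0).foldl
      (fun (d : PySem.Dict String Int) p => d.insert p.2 (base + (if p.1 < rem then 1 else 0)))
      PySem.Dict.empty).items
  else if mode == "per_robot" then
    (robot_names.foldl (fun (d : PySem.Dict String Int) name => d.insert name sample_count)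
      PySem.Dict.empty).items
  else []  -- Python raises ValueError here; excluded by Pre_

-- ===== PORT B =====
-- the for-loop of Source B's 'total' branch, state = (remaining, left, result)
def pvAltGo (names : List String) (remaining left : Int) (d : PySem.Dict String Int) : PySem.Dict String Int :=
  match names with
  | [] => d
  | name :: rest =>
    let give := -(PySem.Int.floordiv (-remaining) left)
    pvAltGo rest (remaining - give) (left - 1) (d.insert name give)

def compute_sample_count_map_py_alt (robot_names : List String) (sample_count : Int) (mode : String) : List (String × Int) :=
  let n : Int := robot_names.length
  if n ≤ 0 then []
  else if mode == "total" then
    (pvAltGo robot_names sample_count n PySem.Dict.empty).items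
  else if mode == "per_robot" then
    (robot_names.foldl (fun (d : PySem.Dict String Int) name => d.insert name sample_count)
      PySem.Dict.empty).items
  else []  -- Python raises ValueError here; excluded by Pre_

-- ===== PRECONDITION & SPEC =====
-- A raises ValueError when the list is nonempty and the mode is neither "total" nor "per_robot".
def Pre_compute_sample_count_map_py (robot_names : List String) (sample_count : Int) (mode : String) : Prop :=
  robot_names = [] ∨ mode = "total" ∨ mode = "per_robot"
instance (robot_names : List String) (sample_count : Int) (mode : String) : Decidable (Pre_compute_sample_count_map_py robot_names sample_count mode) := by unfold Pre_compute_sample_count_map_py; infer_instance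

def pvWitness_compute_sample_count_map_py : List String × Int × String := (["ur5", "panda", "ur5"], -7, "total")

def Spec_compute_sample_count_map_py (robot_names : List String) (sample_count : Int) (mode : String) (out : List (String × Int)) : Prop := out = compute_sample_count_map_py_alt robot_names sample_count mode
instance (robot_names : List String) (sample_count : Int) (mode : String) (out : List (String × Int)) : Decidable (Spec_compute_sample_count_map_py robot_names sample_count mode out) := by unfold Spec_compute_sample_count_map_py; infer_instance

-- ===== CLAIM (what is proved, stated in full; the proofs are below) =====
def Claim_equal_compute_sample_count_map_py : Prop := ∀ (robot_names : List String) (sample_count : Int) (mode : String), Dom_compute_sample_count_map_py robot_names sample_count mode → Pre_compute_sample_count_map_py robot_names sample_count mode → Spec_compute_sample_count_map_py robot_names sample_count mode (compute_sample_count_map_py robot_names sample_count mode)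

-- ===== LEMMAS AND PROOFS =====

-- The greedy loop with remaining = base*len + r (0 ≤ r ≤ len) equals the closed-form fold:
-- the first r names (relative to start index s) get base+1, the rest get base.
theorem pvAltGo_eq_fold : ∀ (names : List String) (base r s : Int) (d : PySem.Dict String Int),
    0 ≤ r → r ≤ (names.length : Int) →
    pvAltGo names (base * names.length + r) (names.length : Int) d
      = (PySem.List.enumerate names s).foldl
          (fun (d : PySem.Dict String Int) p => d.insert p.2 (base + (if p.1 - s < r then 1 else 0))) d := by
  intro names
  induction names with
  | nil => intro base r s d h0 h1; simp [pvAltGo, PySem.List.enumerate_nil]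
  | cons x rest ih =>
    intro base r s d h0 h1
    set L : Int := ((x :: rest).length : Int) with hLdef
    have hL : L = (rest.length : Int) + 1 := by rw [hLdef]; push_cast [List.length_cons]; ring
    have hLpos : (0:Int) < L := by rw [hL]; positivity
    -- the value given to x
    have hgive : -(PySem.Int.floordiv (-(base * L + r)) L) = base + (if 0 < r then 1 else 0) := by
      rw [PySem.Int.neg_floordiv_neg_eq_iff_of_pos hLpos]
      by_cases hr : 0 < r
      · rw [if_pos hr]; constructor <;> nlinarith
      · rw [if_neg hr]
        have hr0 : r = 0 := by omega
        subst hr0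
        constructor <;> nlinarith
    rw [pvAltGo, PySem.List.enumerate_cons]
    simp only [List.foldl_cons, hgive]
    have hx : (if (s : Int) - s < r then (1:Int) else 0) = (if 0 < r then 1 else 0) := by
      simp
    rw [hx]
    -- new remainder
    have hrem : base * L + r - (base + (if 0 < r then 1 else 0))
        = base * (rest.length : Int) + (if 0 < r then r - 1 else r) := by
      by_cases hr : 0 < r <;> simp [hr, hL] <;> ring
    rw [hrem]
    have hL1 : L - 1 = (rest.length : Int) := by omega
    rw [hL1]
    rw [ih base (if 0 < r then r - 1 else r) (s + 1) _ (by omega) (by rw [hL] at h1; omega)]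
    apply PySem.List.foldl_congr_mem
    intro acc p hp
    rcases (PySem.List.mem_enumerate_iff _ _ _).1 hp with ⟨k, hk, rfl⟩
    have hiff : ((s + 1 + (k : Int)) - (s + 1) < (if 0 < r then r - 1 else r)) ↔ ((s + 1 + (k : Int)) - s < r) := by
      by_cases hr : 0 < r <;> simp [hr] <;> omega
    simp only [hiff]

theorem compute_sample_count_map_py_spec : Claim_equal_compute_sample_count_map_py := by
  intro names sc mode _hdom hpre
  unfold Spec_compute_sample_count_map_py compute_sample_count_map_py compute_sample_count_map_py_alt
  by_cases hn : ((names.length : Int) ≤ 0)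
  · have hnil : names = [] := List.eq_nil_of_length_eq_zero (by omega)
    simp [hnil]
  · simp only [hn, if_false]
    by_cases hm : mode == "total"
    · simp only [hm, if_true]
      congr 1
      symm
      have hpos : (0:Int) < (names.length : Int) := by omega
      have hsum := PySem.Int.floordiv_mul_add_mod sc (names.length : Int)
      have hmod := PySem.Int.mod_eq_emod_of_pos (a := sc) hpos
      have h0 : 0 ≤ PySem.Int.mod sc (names.length : Int) := by
        rw [hmod]; exact Int.emod_nonneg sc (by omega)
      have h1 : PySem.Int.mod sc (names.length : Int) < (names.length : Int) := by
        rw [hmod]; exact Int.emod_lt_of_pos sc hpos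
      calc pvAltGo names sc (names.length : Int) PySem.Dict.empty
          = pvAltGo names (PySem.Int.floordiv sc (names.length : Int) * (names.length : Int)
              + PySem.Int.mod sc (names.length : Int)) (names.length : Int) PySem.Dict.empty := by
            rw [hsum]
        _ = _ := by
            rw [pvAltGo_eq_fold names _ _ 0 _ h0 (le_of_lt h1)]
            apply PySem.List.foldl_congr_mem
            intro acc p _; simp
    · simp [hm]

-- ===== VERDICT (by name: the statement is the Claim_ definition above) =====
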